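-- pv_equiv track=rewrite | github.com/Roman-Kulyk/Practicum_z_programuvannya | task_487.py | calculate_neighbours_sum
-- ===== SOURCE A (Python) =====
-- def calculate_neighbours_sum(input_list):
--     output_list = []
--     if len(input_list) == 1:
--         return input_list
--
--     for i in range(len(input_list)):
--         left_neighbor = input_list[(i - 1) % len(input_list)]
--         right_neighbor = input_list[(i + 1) % len(input_list)]
--         neighbor_sum = left_neighbor + right_neighbor
--         output_list.append(neighbor_sum)
--     return output_list
-- ===== SOURCE B (Python) =====
-- def calculate_neighbours_sum(input_list):
--     if len(input_list) == 1:
--         return input_list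
--     left = input_list[-1:] + input_list[:-1]
--     right = input_list[1:] + input_list[:1]
--     return [l + r for l, r in zip(left, right)]
-- ===== Notes on version B (the rewrite author's own statement) =====
-- stated objective: simpler
-- what changed: Replaces the index loop with modular arithmetic by two slice-built rotations of the list zipped and summed element-wise.
import Mathlib
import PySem

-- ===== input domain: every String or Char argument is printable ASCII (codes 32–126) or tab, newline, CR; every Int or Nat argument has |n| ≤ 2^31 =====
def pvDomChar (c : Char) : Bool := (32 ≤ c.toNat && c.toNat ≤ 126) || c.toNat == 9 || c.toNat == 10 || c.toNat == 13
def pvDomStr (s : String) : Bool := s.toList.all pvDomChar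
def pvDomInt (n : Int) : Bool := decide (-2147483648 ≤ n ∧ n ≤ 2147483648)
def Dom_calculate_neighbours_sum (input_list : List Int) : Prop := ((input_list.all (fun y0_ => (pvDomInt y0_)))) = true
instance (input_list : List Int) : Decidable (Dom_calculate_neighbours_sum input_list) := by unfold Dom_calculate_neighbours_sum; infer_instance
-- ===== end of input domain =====

-- B replaces the modular-index loop by two slice-built rotations of the list, zipped and summed (objective: simpler).

-- ===== PORT A =====
-- Python indexes input_list[(i±1) % len(input_list)] directly; inside the loop the index
-- is always in range (0 ≤ m % len < len), so pyGetD's default 0 is never reached.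
def calculate_neighbours_sum (input_list : List Int) : List Int :=
  if input_list.length = 1 then input_list
  else
    (PySem.List.pyRange 0 input_list.length 1).foldl
      (fun output_list i =>
        let left_neighbor := PySem.List.pyGetD input_list (PySem.Int.mod (i - 1) input_list.length) 0
        let right_neighbor := PySem.List.pyGetD input_list (PySem.Int.mod (i + 1) input_list.length) 0
        output_list ++ [left_neighbor + right_neighbor]) []

-- ===== PORT B =====
def calculate_neighbours_sum_alt (input_list : List Int) : List Int :=
  if input_list.length = 1 then input_list
  else
    let left := PySem.List.slice input_list (some (-1)) none ++ PySem.List.slice input_list none (some (-1))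
    let right := PySem.List.slice input_list (some 1) none ++ PySem.List.slice input_list none (some 1)
    (left.zip right).map (fun p => p.1 + p.2)

-- ===== PRECONDITION & SPEC =====
def Spec_calculate_neighbours_sum (input_list : List Int) (out : List Int) : Prop := out = calculate_neighbours_sum_alt input_list
instance (input_list : List Int) (out : List Int) : Decidable (Spec_calculate_neighbours_sum input_list out) := by unfold Spec_calculate_neighbours_sum; infer_instance

-- ===== CLAIM (what is proved, stated in full; the proofs are below) =====
def Claim_equal_calculate_neighbours_sum : Prop := ∀ (input_list : List Int), Dom_calculate_neighbours_sum input_list → Spec_calculate_neighbours_sum input_list (calculate_neighbours_sum input_list)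

-- ===== LEMMAS AND PROOFS =====

theorem getElem_idx_eq {l : List Int} {i j : Nat} (hi : i < l.length) (hj : j < l.length) (h : i = j) : l[i] = l[j] := by subst h; rfl

theorem calc_eq (l : List Int) : calculate_neighbours_sum l = calculate_neighbours_sum_alt l := by
  unfold calculate_neighbours_sum calculate_neighbours_sum_alt
  by_cases h1 : l.length = 1
  · simp [h1]
  · simp only [if_neg h1]
    rcases l with _ | ⟨x, xs⟩
    · decide
    · set l := x :: xs with hl
      have hn : 2 ≤ l.length := by
        rcases xs with _ | _
        · exact absurd rfl h1
        · simp [hl]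
      have h4 : PySem.List.slice l none (some 1) = l.take 1 := by
        exact_mod_cast PySem.List.slice_to_natCast l 1
      rw [PySem.List.foldl_append_singleton_eq_map,
          PySem.List.slice_from_neg_one, PySem.List.slice_to_neg_one,
          PySem.List.slice_from_one, h4, List.nil_append]
      apply List.ext_getElem
      · simp [PySem.List.length_pyRange_one]
        omega
      · intro k hk1 hk2
        have hklt : k < l.length := by
          simpa [PySem.List.length_pyRange_one] using hk1
        rw [List.getElem_map, List.getElem_map, PySem.List.getElem_pyRange_one,
            List.getElem_zip]
        simp only [zero_add]
        have hpos : (0:Int) < l.length := by exact_mod_cast Nat.lt_of_lt_of_le Nat.zero_lt_two hn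
        have hmodL : PySem.Int.mod ((k:Int) - 1) l.length = (((if k = 0 then l.length - 1 else k - 1) : Nat) : Int) := by
          rw [PySem.Int.mod_eq_emod_of_pos hpos]
          split
          · next h0 =>
            subst h0
            have := Int.add_mul_emod_self_left (a := (l.length:Int) - 1) (b := (l.length:Int)) (c := -1)
            rw [show ((0:Nat):Int) - 1 = (l.length:Int) - 1 + (l.length:Int) * (-1) by ring, this,
                Int.emod_eq_of_lt (by omega) (by omega)]
            omega
          · next h0 =>
            rw [Int.emod_eq_of_lt (by omega) (by omega)]
            omega
        have hmodR : PySem.Int.mod ((k:Int) + 1) l.length = (((if k = l.length - 1 then 0 else k + 1) : Nat) : Int) := by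
          rw [PySem.Int.mod_eq_emod_of_pos hpos]
          split
          · next h0 =>
            rw [show ((k:Int)) + 1 = (l.length:Int) by omega, Int.emod_self]
            simp
          · next h0 =>
            rw [Int.emod_eq_of_lt (by omega) (by omega)]
            omega
        rw [hmodL, hmodR, PySem.List.pyGetD_natCast, PySem.List.pyGetD_natCast]
        have hL : l.length - 1 < l.length := by omega
        have hdrop : (List.drop (l.length - 1) l).length = 1 := by simp; omega
        have hdl : l.dropLast.length = l.length - 1 := by simp
        have htl : l.tail.length = l.length - 1 := by simp
        have htk : (List.take 1 l).length = 1 := by simp; omega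
        rw [List.getElem_append, List.getElem_append]
        split_ifs with hA hB <;> try omega
        all_goals
          simp only [List.getElem_drop, List.getElem_dropLast, List.getElem_tail, List.getElem_take,
            hdrop, htl]
        all_goals
          rw [List.getD_eq_getElem _ _ (by omega), List.getD_eq_getElem _ _ (by omega)]
        all_goals
          congr 1 <;> (apply getElem_idx_eq <;> omega)

-- ===== VERDICT (by name: the statement is the Claim_ definition above) =====
theorem calculate_neighbours_sum_spec : Claim_equal_calculate_neighbours_sum := by
  intro l _
  exact calc_eq l
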